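-- pv_equiv track=rewrite | github.com/emil2099/block-data-store | block_data_store/renderers/markdown/renderer.py | _join_sections
-- ===== SOURCE A (Python) =====
-- from typing import Any, Mapping, Sequence
--
-- def _join_sections(sections: Sequence[str]) -> str:
--     cleaned = [section.strip() for section in sections if section and section.strip()]
--     if not cleaned:
--         return ""
--
--     output = cleaned[0]
--     for section in cleaned[1:]:
--         separator = "\n\n"
--         prev_kind = _section_kind(output.splitlines()[-1])
--         next_kind = _section_kind(section.splitlines()[0])
--         if prev_kind and prev_kind == next_kind and prev_kind in {"bullet", "numbered"}:
--             separator = "\n"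
--         output = f"{output}{separator}{section}"
--     return output
--
-- def _section_kind(line: str) -> str | None:
--     stripped = line.lstrip()
--     if not stripped:
--         return None
--     if stripped[0] in "-*+" and (len(stripped) == 1 or stripped[1].isspace()):
--         return "bullet"
--     number_prefix = stripped.split(" ", 1)[0]
--     if number_prefix.endswith(".") and number_prefix[:-1].isdigit():
--         return "numbered"
--     return None
-- ===== SOURCE B (Python) =====
-- def _line_kind(line):
--     # 0 = not a list item, 1 = bullet, 2 = numbered; decided by an index scan
--     i, n = 0, len(line)
--     while i < n and line[i].isspace():
--         i += 1
--     if i == n: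
--         return 0
--     if line[i] in "-*+" and (i + 1 == n or line[i + 1].isspace()):
--         return 1
--     j = i
--     while j < n and line[j].isdigit():
--         j += 1
--     if j > i and j < n and line[j] == "." and (j + 1 == n or line[j + 1] == " "):
--         return 2
--     return 0
--
-- def _first_line(s):
--     out = []
--     for ch in s:
--         if ch in "\r\n":
--             break
--         out.append(ch)
--     return "".join(out)
--
-- def _last_line(s):
--     out = []
--     for ch in reversed(s):
--         if ch in "\r\n":
--             break
--         out.append(ch)
--     out.reverse()
--     return "".join(out)
--
-- def _join_sections(sections):
--     parts = []
--     prev_tail = 0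
--     for section in sections:
--         sec = section.strip()
--         if not sec:
--             continue
--         if parts:
--             sep = "\n" if prev_tail and _line_kind(_first_line(sec)) == prev_tail else "\n\n"
--             parts.append(sep)
--         parts.append(sec)
--         prev_tail = _line_kind(_last_line(sec))
--     return "".join(parts)
-- ===== Notes on version B (the rewrite author's own statement) =====
-- stated objective: faster
-- what changed: Replaces A's clean-then-concatenate loop (which re-runs splitlines on the entire growing output every iteration and classifies lines via string tokens) by a single streaming pass that strips inline, finds first/last lines by direct boundary scans without splitlines, classifies them with an integer index-scan state, carries the previous tail kind, and joins collected parts once.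
import Mathlib
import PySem

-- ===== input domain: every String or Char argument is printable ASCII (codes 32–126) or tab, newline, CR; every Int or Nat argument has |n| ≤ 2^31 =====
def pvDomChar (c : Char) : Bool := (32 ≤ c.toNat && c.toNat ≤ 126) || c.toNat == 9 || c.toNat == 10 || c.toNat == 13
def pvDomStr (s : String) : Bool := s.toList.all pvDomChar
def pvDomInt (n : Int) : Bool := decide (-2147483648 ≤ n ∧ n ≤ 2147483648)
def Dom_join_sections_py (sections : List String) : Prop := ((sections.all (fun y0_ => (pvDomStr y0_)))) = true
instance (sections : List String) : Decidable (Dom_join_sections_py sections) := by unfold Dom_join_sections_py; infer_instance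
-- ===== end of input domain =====

-- B replaces A's clean-then-concatenate loop (which re-runs splitlines on the whole growing
-- output each iteration) by one streaming pass: strip inline, find first/last lines by direct
-- boundary scans, classify with integer kind codes, carry the previous tail kind, join parts once.

-- ===== PORT A =====
-- shared module helper _section_kind (A's string-token classifier)
def sectionKind (line : List Char) : Option String :=
  match PySem.Chars.lstrip line with
  | [] => none
  | c :: rest =>
    -- `stripped[0] in "-*+" and (len(stripped) == 1 or stripped[1].isspace())`
    -- (`rest.headD ' '` is only reached when rest ≠ [], mirroring the short-circuit `or`)
    if PySem.Chars.isIn [c] ['-', '*', '+'] &&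
        (rest.isEmpty || PySem.Chars.isspace (rest.headD ' ')) then some "bullet"
    else
      -- number_prefix = stripped.split(" ", 1)[0]  (split always non-empty, so [0] is safe)
      let numberPrefix := (PySem.Chars.splitOnMax (c :: rest) [' '] 1).headD []
      if PySem.Chars.endswith numberPrefix ['.'] &&
          PySem.Chars.strIsdigit numberPrefix.dropLast then some "numbered"
      else none

-- the `for section in cleaned[1:]` loop, carrying `output`
-- (`.getD []` on output.splitlines()[-1] / section.splitlines()[0] is never hit:
--  output and every section are non-empty, so splitlines is non-empty)
def joinLoopA : List (List Char) → List Char → List Char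
  | [], output => output
  | sec :: rest, output =>
    let prevKind := sectionKind ((PySem.List.pyGet? (PySem.Chars.splitlines output) (-1)).getD [])
    let nextKind := sectionKind ((PySem.List.pyGet? (PySem.Chars.splitlines sec) 0).getD [])
    let separator :=
      if prevKind.isSome && prevKind == nextKind &&
          (prevKind == some "bullet" || prevKind == some "numbered") then ['\n']
      else ['\n', '\n']
    joinLoopA rest (output ++ separator ++ sec)

def join_sections_py (sections : List String) : String :=
  let cleaned := ((sections.map String.toList).filter
      (fun s => !s.isEmpty && !(PySem.Chars.strip s).isEmpty)).map PySem.Chars.strip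
  match cleaned with
  | [] => ""
  | first :: rest => String.mk (joinLoopA rest first)

-- ===== PORT B =====
-- B-side helper _first_line: collect chars until a line-break character
def firstLineScan (s : List Char) : List Char :=
  s.takeWhile (fun c => !(c == '\r' || c == '\n'))

-- B-side helper _last_line: the same scan over reversed(s), reversed back
def lastLineScan (s : List Char) : List Char :=
  (s.reverse.takeWhile (fun c => !(c == '\r' || c == '\n'))).reverse

-- B-side helper _line_kind: 0 / 1 (bullet) / 2 (numbered) by index scans
def lineKindB (line : List Char) : Int :=
  match line.dropWhile PySem.Chars.isspace with   -- the leading-whitespace `while` scan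
  | [] => 0
  | c :: tail =>
    if PySem.Chars.isIn [c] ['-', '*', '+'] &&
        (tail.isEmpty || PySem.Chars.isspace (tail.headD ' ')) then 1
    else
      -- the digit `while` scan: j past the digit run, then look at line[j], line[j+1]
      if !((c :: tail).takeWhile PySem.Chars.isdigit).isEmpty &&
          !((c :: tail).dropWhile PySem.Chars.isdigit).isEmpty &&
          ((c :: tail).dropWhile PySem.Chars.isdigit).headD ' ' == '.' &&
          (((c :: tail).dropWhile PySem.Chars.isdigit).tail.isEmpty ||
            ((c :: tail).dropWhile PySem.Chars.isdigit).tail.headD ' ' == ' ') then 2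
      else 0

-- B's single `for section in sections` pass, carrying `parts` and `prev_tail`
def joinLoopB : List (List Char) → List (List Char) → Int → List (List Char)
  | [], parts, _ => parts
  | sct :: rest, parts, prevTail =>
    let sec := PySem.Chars.strip sct
    if sec.isEmpty then joinLoopB rest parts prevTail
    else
      let parts1 :=
        if parts.isEmpty then parts
        else parts ++ [if prevTail != 0 && lineKindB (firstLineScan sec) == prevTail
                       then ['\n'] else ['\n', '\n']]
      joinLoopB rest (parts1 ++ [sec]) (lineKindB (lastLineScan sec))

def join_sections_py_alt (sections : List String) : String :=
  String.mk (PySem.Chars.join [] (joinLoopB (sections.map String.toList) [] 0))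

-- ===== PRECONDITION & SPEC =====
def Spec_join_sections_py (sections : List String) (out : String) : Prop := out = join_sections_py_alt sections
instance (sections : List String) (out : String) : Decidable (Spec_join_sections_py sections out) := by unfold Spec_join_sections_py; infer_instance

-- ===== CLAIM (what is proved, stated in full; the proofs are below) =====
def Claim_equal_join_sections_py : Prop := ∀ (sections : List String), Dom_join_sections_py sections → Spec_join_sections_py sections (join_sections_py sections)

-- ===== LEMMAS AND PROOFS =====

-- conditional equation lemmas for splitlines.go (its '\r\n' pattern overlaps the generic cons)
theorem go_cons (isB : Char → Bool) (c : Char) (hc : c ≠ '\r') (rest cur : List Char)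
    (acc : List (List Char)) :
    PySem.Chars.splitlines.go isB (c :: rest) cur acc =
      if isB c then PySem.Chars.splitlines.go isB rest [] (cur.reverse :: acc)
      else PySem.Chars.splitlines.go isB rest (c :: cur) acc := by
  rcases rest with _ | ⟨d, rest⟩
  · simp [PySem.Chars.splitlines.go]
  · by_cases hd : d = '\n'
    · subst hd; simp [PySem.Chars.splitlines.go, hc]
    · simp [PySem.Chars.splitlines.go, hc, hd]

theorem go_cr (isB : Char → Bool) (hB : isB '\r' = true) (rest cur : List Char)
    (acc : List (List Char)) (hd : rest.head? ≠ some '\n') :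
    PySem.Chars.splitlines.go isB ('\r' :: rest) cur acc =
      PySem.Chars.splitlines.go isB rest [] (cur.reverse :: acc) := by
  rcases rest with _ | ⟨d, rest⟩
  · simp [PySem.Chars.splitlines.go, hB]
  · by_cases h : d = '\n'
    · subst h; simp at hd
    · simp [PySem.Chars.splitlines.go, hB, h]

theorem go_crlf (isB : Char → Bool) (rest cur : List Char) (acc : List (List Char)) :
    PySem.Chars.splitlines.go isB ('\r' :: '\n' :: rest) cur acc =
      PySem.Chars.splitlines.go isB rest [] (cur.reverse :: acc) := by
  simp [PySem.Chars.splitlines.go]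

-- the accumulator of splitlines.go is a plain prefix
theorem go_acc (isB : Char → Bool) (hr : isB '\r' = true) :
    ∀ (n : Nat) (s : List Char), s.length ≤ n → ∀ (cur : List Char) (acc : List (List Char)),
      PySem.Chars.splitlines.go isB s cur acc =
        acc.reverse ++ PySem.Chars.splitlines.go isB s cur [] := by
  intro n
  induction n with
  | zero =>
    intro s hs cur acc
    rcases s with _ | ⟨c, rest⟩
    · simp [PySem.Chars.splitlines.go]; split <;> simp
    · simp at hs
  | succ n ih =>
    intro s hs cur acc
    rcases s with _ | ⟨c, rest⟩
    · simp [PySem.Chars.splitlines.go]; split <;> simp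
    · by_cases hc : c = '\r'
      · subst hc
        rcases rest with _ | ⟨d, rest'⟩
        · rw [go_cr isB hr _ _ _ (by simp), go_cr isB hr _ _ _ (by simp)]
          rw [ih [] (by simp) [] (cur.reverse :: acc), ih [] (by simp) [] [cur.reverse]]
          simp
        · by_cases hd : d = '\n'
          · subst hd
            rw [go_crlf, go_crlf]
            rw [ih rest' (by simp at hs; omega) [] (cur.reverse :: acc),
                ih rest' (by simp at hs; omega) [] [cur.reverse]]
            simp
          · rw [go_cr isB hr _ _ _ (by simp [hd]), go_cr isB hr _ _ _ (by simp [hd])]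
            rw [ih (d :: rest') (by simp only [List.length_cons] at hs ⊢; omega) [] (cur.reverse :: acc),
                ih (d :: rest') (by simp only [List.length_cons] at hs ⊢; omega) [] [cur.reverse]]
            simp
      · rw [go_cons isB c hc, go_cons isB c hc]
        by_cases hB : isB c
        · simp only [hB, if_true]
          rw [ih rest (by simp at hs; omega) [] (cur.reverse :: acc),
              ih rest (by simp at hs; omega) [] [cur.reverse]]
          simp
        · simp only [hB, Bool.false_eq_true, if_false]
          exact ih rest (by simp at hs; omega) (c :: cur) acc

-- go never returns [] unless everything is empty
theorem go_ne (isB : Char → Bool) (hr : isB '\r' = true) :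
    ∀ (n : Nat) (s : List Char), s.length ≤ n → ∀ (cur : List Char) (acc : List (List Char)),
      (s ≠ [] ∨ cur ≠ [] ∨ acc ≠ []) → PySem.Chars.splitlines.go isB s cur acc ≠ [] := by
  intro n
  induction n with
  | zero =>
    intro s hs cur acc h
    rcases s with _ | ⟨c, rest⟩
    · simp [PySem.Chars.splitlines.go]
      rcases h with h | h | h
      · exact absurd rfl h
      · split <;> simp_all
      · split <;> simp_all
    · simp at hs
  | succ n ih =>
    intro s hs cur acc h
    rcases s with _ | ⟨c, rest⟩
    · simp [PySem.Chars.splitlines.go]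
      rcases h with h | h | h
      · exact absurd rfl h
      · split <;> simp_all
      · split <;> simp_all
    · by_cases hc : c = '\r'
      · subst hc
        rcases rest with _ | ⟨d, rest'⟩
        · rw [go_cr isB hr _ _ _ (by simp)]
          exact ih [] (by simp) [] (cur.reverse :: acc) (by simp)
        · by_cases hd : d = '\n'
          · subst hd
            rw [go_crlf]
            exact ih rest' (by simp at hs; omega) [] (cur.reverse :: acc) (by simp)
          · rw [go_cr isB hr _ _ _ (by simp [hd])]
            exact ih (d :: rest') (by simp only [List.length_cons] at hs ⊢; omega) []
              (cur.reverse :: acc) (by simp)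
      · rw [go_cons isB c hc]
        by_cases hB : isB c
        · simp only [hB, if_true]
          exact ih rest (by simp at hs; omega) [] (cur.reverse :: acc) (by simp)
        · simp only [hB, Bool.false_eq_true, if_false]
          exact ih rest (by simp at hs; omega) (c :: cur) acc (by simp)

-- a '\n' splits the work of splitlines.go in two
theorem go_split (isB : Char → Bool) (hr : isB '\r' = true) (hn : isB '\n' = true) :
    ∀ (n : Nat) (s : List Char), s.length ≤ n → ∀ (ys cur : List Char) (acc : List (List Char)),
      PySem.Chars.splitlines.go isB (s ++ '\n' :: ys) cur acc =
        PySem.Chars.splitlines.go isB (s ++ ['\n']) cur acc ++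
          PySem.Chars.splitlines.go isB ys [] [] := by
  intro n
  induction n with
  | zero =>
    intro s hs ys cur acc
    rcases s with _ | ⟨c, rest⟩
    · simp only [List.nil_append]
      rw [go_cons isB '\n' (by decide) _ _ _, go_cons isB '\n' (by decide) _ _ _]
      simp only [hn, if_true]
      rw [go_acc isB hr ys.length ys le_rfl [] (cur.reverse :: acc)]
      simp [PySem.Chars.splitlines.go]
    · simp at hs
  | succ n ih =>
    intro s hs ys cur acc
    rcases s with _ | ⟨c, rest⟩
    · simp only [List.nil_append]
      rw [go_cons isB '\n' (by decide) _ _ _, go_cons isB '\n' (by decide) _ _ _]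
      simp only [hn, if_true]
      rw [go_acc isB hr ys.length ys le_rfl [] (cur.reverse :: acc)]
      simp [PySem.Chars.splitlines.go]
    · by_cases hc : c = '\r'
      · subst hc
        rcases rest with _ | ⟨d, rest'⟩
        · simp only [List.cons_append, List.nil_append]
          rw [go_crlf, go_crlf]
          rw [go_acc isB hr ys.length ys le_rfl [] (cur.reverse :: acc)]
          simp [PySem.Chars.splitlines.go]
        · by_cases hd : d = '\n'
          · subst hd
            simp only [List.cons_append]
            rw [go_crlf, go_crlf]
            exact ih rest' (by simp at hs; omega) ys [] (cur.reverse :: acc)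
          · simp only [List.cons_append]
            rw [go_cr isB hr _ _ _ (by simp [hd]), go_cr isB hr _ _ _ (by simp [hd])]
            exact ih (d :: rest') (by simp only [List.length_cons] at hs ⊢; omega) ys []
              (cur.reverse :: acc)
      · simp only [List.cons_append]
        rw [go_cons isB c hc, go_cons isB c hc]
        by_cases hB : isB c
        · simp only [hB, if_true]
          exact ih rest (by simp at hs; omega) ys [] (cur.reverse :: acc)
        · simp only [hB, Bool.false_eq_true, if_false]
          exact ih rest (by simp at hs; omega) ys (c :: cur) acc

-- a lone '\r' (not followed by '\n') splits splitlines.go the same way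
theorem go_split_cr (isB : Char → Bool) (hr : isB '\r' = true) :
    ∀ (n : Nat) (s : List Char), s.length ≤ n → ∀ (ys cur : List Char) (acc : List (List Char)),
      ys.head? ≠ some '\n' →
      PySem.Chars.splitlines.go isB (s ++ '\r' :: ys) cur acc =
        PySem.Chars.splitlines.go isB (s ++ ['\r']) cur acc ++
          PySem.Chars.splitlines.go isB ys [] [] := by
  intro n
  induction n with
  | zero =>
    intro s hs ys cur acc hy
    rcases s with _ | ⟨c, rest⟩
    · simp only [List.nil_append]
      rw [go_cr isB hr _ _ _ hy, go_cr isB hr _ _ _ (by simp)]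
      rw [go_acc isB hr ys.length ys le_rfl [] (cur.reverse :: acc)]
      simp [PySem.Chars.splitlines.go]
    · simp at hs
  | succ n ih =>
    intro s hs ys cur acc hy
    rcases s with _ | ⟨c, rest⟩
    · simp only [List.nil_append]
      rw [go_cr isB hr _ _ _ hy, go_cr isB hr _ _ _ (by simp)]
      rw [go_acc isB hr ys.length ys le_rfl [] (cur.reverse :: acc)]
      simp [PySem.Chars.splitlines.go]
    · by_cases hc : c = '\r'
      · subst hc
        rcases rest with _ | ⟨d, rest'⟩
        · simp only [List.cons_append, List.nil_append]
          have e1 := go_cr isB hr ('\r' :: ys) cur acc (by simp)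
          have e2 := go_cr isB hr ys [] (cur.reverse :: acc) hy
          have e3 := go_cr isB hr ['\r'] cur acc (by simp)
          have e4 := go_cr isB hr [] [] (cur.reverse :: acc) (by simp)
          rw [e1, e2, e3, e4, go_acc isB hr ys.length ys le_rfl [] ([].reverse :: cur.reverse :: acc)]
          simp [PySem.Chars.splitlines.go]
        · by_cases hd : d = '\n'
          · subst hd
            simp only [List.cons_append]
            rw [go_crlf, go_crlf]
            exact ih rest' (by simp at hs; omega) ys [] (cur.reverse :: acc) hy
          · simp only [List.cons_append]
            rw [go_cr isB hr _ _ _ (by simp [hd]), go_cr isB hr _ _ _ (by simp [hd])]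
            exact ih (d :: rest') (by simp only [List.length_cons] at hs ⊢; omega) ys []
              (cur.reverse :: acc) hy
      · simp only [List.cons_append]
        rw [go_cons isB c hc, go_cons isB c hc]
        by_cases hB : isB c
        · simp only [hB, if_true]
          exact ih rest (by simp at hs; omega) ys [] (cur.reverse :: acc) hy
        · simp only [hB, Bool.false_eq_true, if_false]
          exact ih rest (by simp at hs; omega) ys (c :: cur) acc hy

-- a '\r\n' pair splits splitlines.go in two as well
theorem go_split_crlf (isB : Char → Bool) (hr : isB '\r' = true) :
    ∀ (n : Nat) (s : List Char), s.length ≤ n → ∀ (ys cur : List Char) (acc : List (List Char)),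
      PySem.Chars.splitlines.go isB (s ++ '\r' :: '\n' :: ys) cur acc =
        PySem.Chars.splitlines.go isB (s ++ ['\r', '\n']) cur acc ++
          PySem.Chars.splitlines.go isB ys [] [] := by
  intro n
  induction n with
  | zero =>
    intro s hs ys cur acc
    rcases s with _ | ⟨c, rest⟩
    · simp only [List.nil_append]
      rw [go_crlf, go_crlf]
      rw [go_acc isB hr ys.length ys le_rfl [] (cur.reverse :: acc)]
      simp [PySem.Chars.splitlines.go]
    · simp at hs
  | succ n ih =>
    intro s hs ys cur acc
    rcases s with _ | ⟨c, rest⟩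
    · simp only [List.nil_append]
      rw [go_crlf, go_crlf]
      rw [go_acc isB hr ys.length ys le_rfl [] (cur.reverse :: acc)]
      simp [PySem.Chars.splitlines.go]
    · by_cases hc : c = '\r'
      · subst hc
        rcases rest with _ | ⟨d, rest'⟩
        · simp only [List.cons_append, List.nil_append]
          have e1 := go_cr isB hr ('\r' :: '\n' :: ys) cur acc (by simp)
          have e2 := go_crlf isB ys [] (cur.reverse :: acc)
          have e3 := go_cr isB hr ['\r', '\n'] cur acc (by simp)
          have e4 := go_crlf isB [] [] (cur.reverse :: acc)
          rw [e1, e2, e3, e4, go_acc isB hr ys.length ys le_rfl [] ([].reverse :: cur.reverse :: acc)]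
          simp [PySem.Chars.splitlines.go]
        · by_cases hd : d = '\n'
          · subst hd
            simp only [List.cons_append]
            rw [go_crlf, go_crlf]
            exact ih rest' (by simp at hs; omega) ys [] (cur.reverse :: acc)
          · simp only [List.cons_append]
            rw [go_cr isB hr _ _ _ (by simp [hd]), go_cr isB hr _ _ _ (by simp [hd])]
            exact ih (d :: rest') (by simp only [List.length_cons] at hs ⊢; omega) ys []
              (cur.reverse :: acc)
      · simp only [List.cons_append]
        rw [go_cons isB c hc, go_cons isB c hc]
        by_cases hB : isB c
        · simp only [hB, if_true]
          exact ih rest (by simp at hs; omega) ys [] (cur.reverse :: acc)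
        · simp only [hB, Bool.false_eq_true, if_false]
          exact ih rest (by simp at hs; omega) ys (c :: cur) acc

-- on break-free input, go yields the single accumulated line
theorem go_nobreak (isB : Char → Bool) (hr : isB '\r' = true) :
    ∀ (s : List Char), (∀ c ∈ s, isB c = false) → ∀ (cur : List Char) (acc : List (List Char)),
      (s ≠ [] ∨ cur ≠ []) →
      PySem.Chars.splitlines.go isB s cur acc = ((cur.reverse ++ s) :: acc).reverse := by
  intro s
  induction s with
  | nil =>
    intro _ cur acc h
    rcases h with h | h
    · exact absurd rfl h
    · simp [PySem.Chars.splitlines.go, h]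
  | cons c rest ih =>
    intro hall cur acc _
    have hc : isB c = false := hall c (by simp)
    have hcr : c ≠ '\r' := fun h => by rw [h, hr] at hc; exact Bool.noConfusion hc
    rw [go_cons isB c hcr, hc]
    simp only [Bool.false_eq_true, if_false]
    rw [ih (fun x hx => hall x (by simp [hx])) (c :: cur) acc (by simp)]
    simp

-- head of go with empty accumulator = accumulated prefix up to the first break
theorem go_headD (isB : Char → Bool) (hr : isB '\r' = true) :
    ∀ (n : Nat) (s : List Char), s.length ≤ n → ∀ (cur : List Char),
      (PySem.Chars.splitlines.go isB s cur []).head?.getD [] =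
        cur.reverse ++ s.takeWhile (fun c => !isB c) := by
  intro n
  induction n with
  | zero =>
    intro s hs cur
    rcases s with _ | ⟨c, rest⟩
    · cases cur <;> simp [PySem.Chars.splitlines.go]
    · simp at hs
  | succ n ih =>
    intro s hs cur
    rcases s with _ | ⟨c, rest⟩
    · cases cur <;> simp [PySem.Chars.splitlines.go]
    · by_cases hc : c = '\r'
      · subst hc
        have ht : List.takeWhile (fun c => !isB c) ('\r' :: rest) = [] := by
          simp [hr]
        rw [ht]
        rcases rest with _ | ⟨d, rest'⟩
        · rw [go_cr isB hr _ _ _ (by simp)]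
          rw [go_acc isB hr 0 [] le_rfl [] [cur.reverse]]
          simp
        · by_cases hd : d = '\n'
          · subst hd
            rw [go_crlf]
            rw [go_acc isB hr rest'.length rest' le_rfl [] [cur.reverse]]
            simp
          · rw [go_cr isB hr _ _ _ (by simp [hd])]
            rw [go_acc isB hr (rest'.length + 1) (d :: rest') (by simp) [] [cur.reverse]]
            simp
      · rw [go_cons isB c hc]
        by_cases hB : isB c
        · simp only [hB, if_true]
          rw [go_acc isB hr rest.length rest le_rfl [] [cur.reverse]]
          simp [hB]
        · simp only [hB, Bool.false_eq_true, if_false]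
          rw [ih rest (by simp at hs; omega) (c :: cur)]
          simp [hB]

-- the two split facts above, at the level of splitlines
theorem splitlines_append_newline (s ys : List Char) :
    PySem.Chars.splitlines (s ++ '\n' :: ys) =
      PySem.Chars.splitlines (s ++ ['\n']) ++ PySem.Chars.splitlines ys := by
  simp only [PySem.Chars.splitlines]
  exact go_split _ (by decide) (by decide) (s.length) s le_rfl ys [] []

theorem splitlines_append_cr (s ys : List Char) (hy : ys.head? ≠ some '\n') :
    PySem.Chars.splitlines (s ++ '\r' :: ys) =
      PySem.Chars.splitlines (s ++ ['\r']) ++ PySem.Chars.splitlines ys := by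
  simp only [PySem.Chars.splitlines]
  exact go_split_cr _ (by decide) (s.length) s le_rfl ys [] [] hy

theorem splitlines_append_crlf (s ys : List Char) :
    PySem.Chars.splitlines (s ++ '\r' :: '\n' :: ys) =
      PySem.Chars.splitlines (s ++ ['\r', '\n']) ++ PySem.Chars.splitlines ys := by
  simp only [PySem.Chars.splitlines]
  exact go_split_crlf _ (by decide) (s.length) s le_rfl ys [] []

theorem splitlines_ne (ys : List Char) (h : ys ≠ []) : PySem.Chars.splitlines ys ≠ [] := by
  simp only [PySem.Chars.splitlines]
  exact go_ne _ (by decide) ys.length ys le_rfl [] [] (Or.inl h)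

theorem pyGet?_neg_one {α : Type} (xs : List α) : PySem.List.pyGet? xs (-1) = xs.getLast? := by
  rcases xs with _ | ⟨a, t⟩
  · rfl
  · simp [PySem.List.pyGet?, PySem.List.pyIdx?, List.getLast?_eq_getElem?]

theorem pyGet?_zero {α : Type} (xs : List α) : PySem.List.pyGet? xs 0 = xs.head? := by
  rcases xs with _ | ⟨a, t⟩
  · rfl
  · simp [PySem.List.pyGet?, PySem.List.pyIdx?]

-- the first/last line of a section, as A's port reads them
def firstLineCL (s : List Char) : List Char :=
  (PySem.List.pyGet? (PySem.Chars.splitlines s) 0).getD []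
def lastLineCL (s : List Char) : List Char :=
  (PySem.List.pyGet? (PySem.Chars.splitlines s) (-1)).getD []

theorem lastLineCL_append (s ys : List Char) (h : ys ≠ []) :
    lastLineCL (s ++ '\n' :: ys) = lastLineCL ys := by
  unfold lastLineCL
  rw [splitlines_append_newline, pyGet?_neg_one, pyGet?_neg_one, List.getLast?_append,
    Option.or_of_isSome (by simpa [List.getLast?_isSome] using splitlines_ne ys h)]

theorem lastLineCL_sep1 (out sec : List Char) (h : sec ≠ []) :
    lastLineCL (out ++ ['\n'] ++ sec) = lastLineCL sec := by
  have : out ++ ['\n'] ++ sec = out ++ '\n' :: sec := by simp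
  rw [this, lastLineCL_append _ _ h]

theorem lastLineCL_sep2 (out sec : List Char) (h : sec ≠ []) :
    lastLineCL (out ++ ['\n', '\n'] ++ sec) = lastLineCL sec := by
  have : out ++ ['\n', '\n'] ++ sec = out ++ '\n' :: ('\n' :: sec) := by simp
  rw [this, lastLineCL_append _ _ (by simp)]
  have : ('\n' :: sec) = [] ++ '\n' :: sec := rfl
  rw [this, lastLineCL_append _ _ h]

-- A's `prev_kind and …` truthiness test is implied by the membership conjunct
theorem cond_eq (a b : Option String) :
    (a.isSome && a == b && (a == some "bullet" || a == some "numbered")) =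
      (a == b && (a == some "bullet" || a == some "numbered")) := by
  cases a <;> simp

-- recursive description of the per-pair separators (proof-only middle form)
def sepOf (prev sec : List Char) : List Char :=
  if sectionKind (lastLineCL prev) == sectionKind (firstLineCL sec) &&
      (sectionKind (lastLineCL prev) == some "bullet" ||
        sectionKind (lastLineCL prev) == some "numbered") then ['\n']
  else ['\n', '\n']

def bJoin : List Char → List (List Char) → List Char
  | _, [] => []
  | prev, sec :: rest => sepOf prev sec ++ sec ++ bJoin sec rest

theorem join_nil_cons (x : List Char) (l : List (List Char)) :
    PySem.Chars.join [] (x :: l) = x ++ PySem.Chars.join [] l := by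
  simp [PySem.Chars.join, List.intercalate]
  induction l with
  | nil => simp
  | cons y l ih => simp [List.intersperse]

-- folding abbreviations (A writes these expressions inline)
theorem fold_last (s : List Char) :
    (PySem.List.pyGet? (PySem.Chars.splitlines s) (-1)).getD [] = lastLineCL s := rfl
theorem fold_first (s : List Char) :
    (PySem.List.pyGet? (PySem.Chars.splitlines s) 0).getD [] = firstLineCL s := rfl

-- A's loop equals bJoin, given the invariant that output's last line is prev's last line
theorem loopA_eq_bJoin :
    ∀ (rest : List (List Char)) (out prev : List Char),
      lastLineCL out = lastLineCL prev → (∀ s ∈ rest, s ≠ []) →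
      joinLoopA rest out = out ++ bJoin prev rest := by
  intro rest
  induction rest with
  | nil => intro out prev _ _; simp [joinLoopA, bJoin]
  | cons sec rest ih =>
    intro out prev hll hne
    have hsec : sec ≠ [] := hne sec (by simp)
    simp only [joinLoopA, fold_last, fold_first, cond_eq, hll]
    rw [bJoin, sepOf]
    by_cases hC : (sectionKind (lastLineCL prev) == sectionKind (firstLineCL sec) &&
        (sectionKind (lastLineCL prev) == some "bullet" ||
          sectionKind (lastLineCL prev) == some "numbered")) = true
    · simp only [hC, if_true]
      rw [ih (out ++ ['\n'] ++ sec) sec (lastLineCL_sep1 out sec hsec)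
        (fun s hs => hne s (by simp [hs]))]
      simp
    · rw [Bool.not_eq_true] at hC
      simp only [hC, Bool.false_eq_true, if_false]
      rw [ih (out ++ ['\n', '\n'] ++ sec) sec (lastLineCL_sep2 out sec hsec)
        (fun s hs => hne s (by simp [hs]))]
      simp

-- every cleaned section is non-empty
theorem cleaned_ne (sections : List String) :
    ∀ s ∈ ((sections.map String.toList).filter
        (fun s => !s.isEmpty && !(PySem.Chars.strip s).isEmpty)).map PySem.Chars.strip,
      s ≠ [] := by
  intro s hs
  simp only [List.mem_map, List.mem_filter] at hs
  obtain ⟨t, ⟨_, ht⟩, rfl⟩ := hs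
  simp only [Bool.and_eq_true, Bool.not_eq_true'] at ht
  simpa [List.isEmpty_iff] using ht.2

-- ========== B-side lemmas ==========

-- generic list helpers
theorem takeWhile_append_all {q : Char → Bool} (u v : List Char) (h : ∀ x ∈ u, q x = true) :
    (u ++ v).takeWhile q = u ++ v.takeWhile q := by
  induction u with
  | nil => simp
  | cons a u ih =>
    have ha := h a (by simp)
    simp [ha, ih (fun x hx => h x (by simp [hx]))]

theorem takeWhile_stop {q : Char → Bool} (u v : List Char) (b : Char) (hb : q b = false) :
    (u ++ b :: v).takeWhile q = u.takeWhile q := by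
  induction u with
  | nil => simp [hb]
  | cons a u ih =>
    simp only [List.cons_append, List.takeWhile_cons]
    cases q a <;> simp [ih]

theorem takeWhile_congr' {p q : Char → Bool} :
    ∀ (l : List Char), (∀ x ∈ l, p x = q x) → l.takeWhile p = l.takeWhile q := by
  intro l
  induction l with
  | nil => intro _; rfl
  | cons a l ih =>
    intro h
    simp only [List.takeWhile_cons, h a (by simp)]
    cases q a <;> simp [ih (fun x hx => h x (by simp [hx]))]

theorem getLast?_cons_ne {α : Type} (a : α) (l : List α) (h : l ≠ []) :
    (a :: l).getLast? = l.getLast? := by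
  rcases l with _ | ⟨b, l⟩
  · exact absurd rfl h
  · exact List.getLast?_cons_cons

theorem dropWhile_head {p : Char → Bool} :
    ∀ (l : List Char) (x : Char) (r : List Char), l.dropWhile p = x :: r → p x = false := by
  intro l
  induction l with
  | nil => intro x r h; exact absurd h (by simp)
  | cons a l ih =>
    intro x r h
    by_cases ha : p a
    · rw [List.dropWhile_cons_of_pos ha] at h; exact ih x r h
    · rw [List.dropWhile_cons_of_neg ha] at h
      obtain ⟨rfl, _⟩ := List.cons.inj h
      simpa using ha

-- character facts
theorem char_eq_iff_toNat (c d : Char) : c = d ↔ c.toNat = d.toNat := by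
  constructor
  · rintro rfl; rfl
  · intro h; exact Char.ext (UInt32.toNat_inj.mp h)

theorem beq_char_toNat (c d : Char) : (c == d) = decide (c.toNat = d.toNat) := by
  rw [Bool.eq_iff_iff, beq_iff_eq, decide_eq_true_iff]
  exact char_eq_iff_toNat c d

-- on the stated domain, splitlines' break set is exactly {'\n', '\r'}
theorem isB_dom (c : Char) (h : pvDomChar c = true) :
    (decide (c.toNat = 10) || decide (c.toNat = 13) || decide (c.toNat = 11) ||
     decide (c.toNat = 12) || decide (c.toNat = 28) || decide (c.toNat = 29) ||
     decide (c.toNat = 30) || decide (c.toNat = 133) || decide (c.toNat = 8232) ||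
     decide (c.toNat = 8233)) = (c == '\r' || c == '\n') := by
  rw [beq_char_toNat, beq_char_toNat]
  simp only [pvDomChar, Bool.or_eq_true, Bool.and_eq_true, decide_eq_true_eq,
    Nat.beq_eq_true_eq] at h
  rw [Bool.eq_iff_iff]
  simp only [Bool.or_eq_true, decide_eq_true_eq]
  have h13 : Char.toNat '\r' = 13 := rfl
  have h10 : Char.toNat '\n' = 10 := rfl
  rw [h13, h10]
  omega

-- ===== first/last line bridges =====

theorem firstLine_bridge (s : List Char) (hdom : ∀ c ∈ s, pvDomChar c = true) :
    firstLineCL s = firstLineScan s := by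
  unfold firstLineCL firstLineScan
  rw [pyGet?_zero]
  simp only [PySem.Chars.splitlines]
  rw [go_headD _ (by decide) s.length s le_rfl []]
  simp only [List.reverse_nil, List.nil_append]
  apply takeWhile_congr'
  intro x hx
  have := isB_dom x (hdom x hx)
  simp only [← this]

theorem lastLine_bridge :
    ∀ (n : Nat) (s : List Char), s.length ≤ n → s ≠ [] →
      (∀ c ∈ s, pvDomChar c = true) →
      (∀ c, s.getLast? = some c → PySem.Chars.isspace c = false) →
      lastLineCL s = lastLineScan s := by
  intro n
  induction n with
  | zero =>
    intro s hs hne _ _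
    rcases s with _ | _
    · exact absurd rfl hne
    · simp at hs
  | succ n ih =>
    intro s hs hne hdom hlast
    by_cases hall : ∀ c ∈ s, (c == '\r' || c == '\n') = false
    · -- break-free: splitlines s = [s] and the reverse scan keeps everything
      have hgo : PySem.Chars.splitlines s = [s] := by
        simp only [PySem.Chars.splitlines]
        rw [go_nobreak _ (by decide) s
          (fun c hc => by rw [isB_dom c (hdom c hc)]; exact hall c hc) [] [] (Or.inl hne)]
        simp
      have htw : s.reverse.takeWhile (fun c => !(c == '\r' || c == '\n')) = s.reverse := by
        have := takeWhile_append_all (q := fun c => !(c == '\r' || c == '\n')) s.reverse []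
          (fun x hx => by
            show (!(x == '\r' || x == '\n')) = true
            rw [hall x (by simpa using hx)]; rfl)
        simpa using this
      unfold lastLineCL lastLineScan
      rw [pyGet?_neg_one, hgo, htw, List.reverse_reverse]
      rfl
    · -- there is a break: split off the first one and recurse on the tail
      have hex : ∃ c ∈ s, (c == '\r' || c == '\n') = true := by
        by_contra hno
        apply hall
        intro c hc
        cases h : (c == '\r' || c == '\n')
        · rfl
        · exact absurd ⟨c, hc, h⟩ hno
      have hdw : s.dropWhile (fun c => !(c == '\r' || c == '\n')) ≠ [] := by
        intro hnil
        obtain ⟨c, hc, hcc⟩ := hex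
        rw [List.dropWhile_eq_nil_iff] at hnil
        have := hnil c hc
        rw [hcc] at this
        simp at this
      obtain ⟨b, rest, hbr⟩ := List.exists_cons_of_ne_nil hdw
      have hsplit : s.takeWhile (fun c => !(c == '\r' || c == '\n')) ++ b :: rest = s := by
        rw [← hbr]; exact List.takeWhile_append_dropWhile
      have hb : (b == '\r' || b == '\n') = true := by
        have := dropWhile_head s b rest hbr
        revert this; cases h : (b == '\r' || b == '\n') <;> simp
      set pre := s.takeWhile (fun c => !(c == '\r' || c == '\n')) with hpre
      have hlen : rest.length ≤ n := by
        have : pre.length + (b :: rest).length = s.length := by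
          rw [← List.length_append, hsplit]
        simp only [List.length_cons] at this
        omega
      have hmem : ∀ c ∈ rest, pvDomChar c = true := by
        intro c hc; exact hdom c (by rw [← hsplit]; simp [hc])
      -- rest is non-empty: otherwise s ends in a break, which is whitespace
      have hbreak_space : ∀ c : Char, (c == '\r' || c == '\n') = true →
          PySem.Chars.isspace c = true := by
        intro c hc
        simp only [Bool.or_eq_true, beq_iff_eq] at hc
        rcases hc with rfl | rfl <;> decide
      have hrest : rest ≠ [] := by
        intro hnil
        subst hnil
        have : s.getLast? = some b := by
          rw [← hsplit]; exact List.getLast?_concat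
        have := hlast b this
        rw [hbreak_space b hb] at this
        exact Bool.noConfusion this
      -- scan side: the reverse scan never reaches past b
      have hscan : lastLineScan s = lastLineScan rest := by
        unfold lastLineScan
        rw [← hsplit]
        have : (pre ++ b :: rest).reverse = rest.reverse ++ b :: pre.reverse := by simp
        rw [this, takeWhile_stop rest.reverse pre.reverse b (by rw [hb]; rfl)]
      have hlast' : ∀ c, rest.getLast? = some c → PySem.Chars.isspace c = false := by
        intro c hc
        apply hlast
        rw [← hsplit, List.getLast?_append, getLast?_cons_ne b rest hrest, hc]
        rfl
      -- splitlines side: split at the break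
      simp only [Bool.or_eq_true, beq_iff_eq] at hb
      rcases hb with rfl | rfl
      · -- b = '\r'
        rcases hrest2 : rest with _ | ⟨d, rest'⟩
        · exact absurd hrest2 hrest
        by_cases hd : d = '\n'
        · -- CRLF break
          subst hd
          have hrest' : rest' ≠ [] := by
            intro hnil
            subst hnil
            have : s.getLast? = some '\n' := by
              rw [← hsplit, hrest2]
              have : pre ++ ['\r', '\n'] = (pre ++ ['\r']) ++ ['\n'] := by simp
              simp only [show pre ++ '\r' :: ['\n'] = (pre ++ ['\r']) ++ ['\n'] by simp]
              exact List.getLast?_concat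
            have := hlast '\n' this
            exact Bool.noConfusion ((by decide : PySem.Chars.isspace '\n' = true) ▸ this)
          have hsl : lastLineCL s = lastLineCL rest' := by
            unfold lastLineCL
            rw [← hsplit, hrest2, splitlines_append_crlf, pyGet?_neg_one, pyGet?_neg_one,
              List.getLast?_append,
              Option.or_of_isSome (by simpa [List.getLast?_isSome] using splitlines_ne rest' hrest')]
          have hscan' : lastLineScan rest = lastLineScan rest' := by
            unfold lastLineScan
            rw [hrest2]
            have : ('\n' :: rest').reverse = rest'.reverse ++ '\n' :: [] := by simp
            rw [this, takeWhile_stop rest'.reverse [] '\n' (by decide)]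
          rw [hsl, hscan, hscan']
          apply ih rest' (by rw [hrest2] at hlen; simp at hlen; omega) hrest'
            (fun c hc => hmem c (by rw [hrest2]; simp [hc]))
          intro c hc
          apply hlast' c
          rw [hrest2, getLast?_cons_ne '\n' rest' hrest', hc]
        · -- lone '\r' break
          have hsl : lastLineCL s = lastLineCL rest := by
            unfold lastLineCL
            rw [← hsplit, splitlines_append_cr pre rest (by rw [hrest2]; simp [hd]),
              pyGet?_neg_one, pyGet?_neg_one, List.getLast?_append,
              Option.or_of_isSome (by simpa [List.getLast?_isSome] using splitlines_ne rest hrest)]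
          rw [hsl, hscan]
          exact ih rest hlen hrest hmem hlast'
      · -- b = '\n'
        have hsl : lastLineCL s = lastLineCL rest := by
          unfold lastLineCL
          rw [← hsplit, splitlines_append_newline, pyGet?_neg_one, pyGet?_neg_one,
            List.getLast?_append,
            Option.or_of_isSome (by simpa [List.getLast?_isSome] using splitlines_ne rest hrest)]
        rw [hsl, hscan]
        exact ih rest hlen hrest hmem hlast'

-- ===== kind bridge =====

theorem splitOnMax_go_zero (sep : List Char) (f : Nat) (l cur : List Char)
    (acc : List (List Char)) :
    PySem.Chars.splitOnMax.go sep f 0 l cur acc = ((cur.reverse ++ l) :: acc).reverse := by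
  cases f <;> cases l <;> simp [PySem.Chars.splitOnMax.go]

theorem splitOnMax_go_one :
    ∀ (f : Nat) (t : List Char), t.length < f → ∀ (cur : List Char) (acc : List (List Char)),
      ∃ r, PySem.Chars.splitOnMax.go [' '] f 1 t cur acc =
        acc.reverse ++ (cur.reverse ++ t.takeWhile (fun c => !(c == ' '))) :: r := by
  intro f
  induction f with
  | zero => intro t ht; omega
  | succ f ih =>
    intro t ht cur acc
    rcases t with _ | ⟨c, rest⟩
    · exact ⟨[], by simp [PySem.Chars.splitOnMax.go]⟩
    · by_cases hc : c = ' '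
      · subst hc
        refine ⟨[rest], ?_⟩
        have : PySem.Chars.splitOnMax.go [' '] (f + 1) 1 (' ' :: rest) cur acc =
            PySem.Chars.splitOnMax.go [' '] f 0 rest [] (cur.reverse :: acc) := by
          simp [PySem.Chars.splitOnMax.go, List.isPrefixOf]
        rw [this, splitOnMax_go_zero]
        simp [List.takeWhile_cons]
      · have hstep : PySem.Chars.splitOnMax.go [' '] (f + 1) 1 (c :: rest) cur acc =
            PySem.Chars.splitOnMax.go [' '] f 1 rest (c :: cur) acc := by
          simp [PySem.Chars.splitOnMax.go, List.isPrefixOf, Ne.symm hc]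
        obtain ⟨r, hr⟩ := ih rest (by simp at ht; omega) (c :: cur) acc
        refine ⟨r, ?_⟩
        rw [hstep, hr]
        simp [List.takeWhile_cons, hc]

theorem np_eq (t : List Char) :
    (PySem.Chars.splitOnMax t [' '] 1).headD [] = t.takeWhile (fun c => !(c == ' ')) := by
  unfold PySem.Chars.splitOnMax
  rw [if_neg (by norm_num)]
  obtain ⟨r, hr⟩ := splitOnMax_go_one (t.length + 1) t (by omega) [] []
  simp only [Int.toNat_one] at *
  rw [hr]
  simp

theorem digit_not_space (x : Char) (h : PySem.Chars.isdigit x = true) : (x == ' ') = false := by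
  by_cases hx : x = ' '
  · subst hx; exact absurd h (by decide)
  · simpa using hx

theorem digit_not_dot (x : Char) (h : PySem.Chars.isdigit x = true) : x ≠ '.' := by
  intro hx; subst hx; exact absurd h (by decide)

theorem endswith_dot (s : List Char) :
    PySem.Chars.endswith s ['.'] = true ↔ s.getLast? = some '.' := by
  rw [PySem.Chars.endswith_iff, List.getLast?_eq_some_iff]
  constructor
  · rintro ⟨t, rfl⟩; exact ⟨t, rfl⟩
  · rintro ⟨ys, rfl⟩; exact ⟨ys, rfl⟩

theorem endswith_digits_false (d : List Char)
    (hd : ∀ x ∈ d, PySem.Chars.isdigit x = true) :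
    PySem.Chars.endswith d ['.'] = false := by
  rw [Bool.eq_false_iff]
  intro h
  have := (endswith_dot d).mp h
  exact digit_not_dot '.' (hd '.' (List.mem_of_getLast? this)) rfl

theorem strIsdigit_false_of_mem (l : List Char) (x : Char) (hx : x ∈ l)
    (h : PySem.Chars.isdigit x = false) : PySem.Chars.strIsdigit l = false := by
  rw [Bool.eq_false_iff]
  intro hT
  simp only [PySem.Chars.strIsdigit, Bool.and_eq_true, List.all_eq_true] at hT
  rw [hT.2 x hx] at h
  exact Bool.noConfusion h

theorem numcond_core (d a : List Char) (hd : ∀ x ∈ d, PySem.Chars.isdigit x = true)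
    (ha : ∀ x r, a = x :: r → PySem.Chars.isdigit x = false) :
    (PySem.Chars.endswith (d ++ a.takeWhile (fun c => !(c == ' '))) ['.'] &&
     PySem.Chars.strIsdigit (d ++ a.takeWhile (fun c => !(c == ' '))).dropLast)
    = (!d.isEmpty && !a.isEmpty && (a.headD ' ' == '.') &&
        (a.tail.isEmpty || a.tail.headD ' ' == ' ')) := by
  rcases a with _ | ⟨x, r2⟩
  · simp only [List.takeWhile_nil, List.append_nil]
    rw [endswith_digits_false d hd]
    simp
  · by_cases hxd : x = '.'
    · subst hxd
      simp only [List.isEmpty_cons, List.headD_cons, List.tail_cons, Bool.not_false,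
        Bool.true_and, beq_self_eq_true, Bool.and_true]
      by_cases hr : (r2.isEmpty || r2.headD ' ' == ' ') = true
      · have htw : ('.' :: r2).takeWhile (fun c => !(c == ' ')) = ['.'] := by
          rcases r2 with _ | ⟨y, r2'⟩
          · rfl
          · simp only [Bool.or_eq_true, List.isEmpty_cons, List.headD_cons, beq_iff_eq] at hr
            rcases hr with h | rfl
            · exact Bool.noConfusion h
            · rfl
        rw [htw, hr]
        have hend : PySem.Chars.endswith (d ++ ['.']) ['.'] = true := by
          rw [endswith_dot]; exact List.getLast?_concat
        rw [hend, List.dropLast_concat]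
        simp only [PySem.Chars.strIsdigit, Bool.true_and, Bool.and_true]
        rw [List.all_eq_true.mpr hd]
        simp
      · rcases r2 with _ | ⟨y, r2'⟩
        · simp at hr
        · simp only [Bool.or_eq_true, List.isEmpty_cons, List.headD_cons] at hr
          push_neg at hr
          have hy : (y == ' ') = false := by
            rcases hr with ⟨_, hy⟩
            revert hy; cases (y == ' ') <;> simp
          have htw : ('.' :: y :: r2').takeWhile (fun c => !(c == ' ')) =
              '.' :: y :: r2'.takeWhile (fun c => !(c == ' ')) := by
            simp [List.takeWhile_cons, hy]
          rw [htw]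
          have hmem : ('.' : Char) ∈ (d ++ '.' :: y :: r2'.takeWhile (fun c => !(c == ' '))).dropLast := by
            rw [List.dropLast_append_cons]
            simp
          rw [strIsdigit_false_of_mem _ '.' hmem (by decide)]
          simp [hy]
    · have hx : PySem.Chars.isdigit x = false := ha x r2 rfl
      have hdot : ((x :: r2).headD ' ' == '.') = false := by
        simpa using hxd
      rw [show (!d.isEmpty && !(x :: r2).isEmpty && ((x :: r2).headD ' ' == '.') &&
            ((x :: r2).tail.isEmpty || (x :: r2).tail.headD ' ' == ' ')) = false by
          rw [hdot]; simp]
      by_cases hxs : x = ' '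
      · subst hxs
        have : (' ' :: r2).takeWhile (fun c => !(c == ' ')) = [] := by
          simp [List.takeWhile_cons]
        rw [this, List.append_nil, endswith_digits_false d hd]
        rfl
      · have hqx : (!(x == ' ')) = true := by simpa using hxs
        have htw : (x :: r2).takeWhile (fun c => !(c == ' ')) =
            x :: r2.takeWhile (fun c => !(c == ' ')) := by
          simp [List.takeWhile_cons, hqx]
        rw [htw]
        rcases hw : r2.takeWhile (fun c => !(c == ' ')) with _ | ⟨z, w'⟩
        · have hend : PySem.Chars.endswith (d ++ [x]) ['.'] = false := by
            rw [Bool.eq_false_iff]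
            intro h
            have := (endswith_dot _).mp h
            rw [List.getLast?_concat] at this
            exact hxd (Option.some.inj this)
          rw [hend, Bool.false_and]
        · have hmem : x ∈ (d ++ x :: z :: w').dropLast := by
            rw [List.dropLast_append_cons]
            simp
          rw [strIsdigit_false_of_mem _ x hmem hx, Bool.and_false]

-- B's digit index scan decides exactly A's token test
theorem numcond_eq (t : List Char) :
    (PySem.Chars.endswith ((PySem.Chars.splitOnMax t [' '] 1).headD []) ['.'] &&
     PySem.Chars.strIsdigit ((PySem.Chars.splitOnMax t [' '] 1).headD []).dropLast)
    = (!(t.takeWhile PySem.Chars.isdigit).isEmpty &&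
       !(t.dropWhile PySem.Chars.isdigit).isEmpty &&
       ((t.dropWhile PySem.Chars.isdigit).headD ' ' == '.') &&
       ((t.dropWhile PySem.Chars.isdigit).tail.isEmpty ||
         (t.dropWhile PySem.Chars.isdigit).tail.headD ' ' == ' ')) := by
  rw [np_eq]
  have ht : t.takeWhile PySem.Chars.isdigit ++ t.dropWhile PySem.Chars.isdigit = t :=
    List.takeWhile_append_dropWhile
  have hq : t.takeWhile (fun c => !(c == ' ')) =
      t.takeWhile PySem.Chars.isdigit ++
        (t.dropWhile PySem.Chars.isdigit).takeWhile (fun c => !(c == ' ')) := by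
    conv_lhs => rw [← ht]
    exact takeWhile_append_all _ _
      (fun x hx => by simpa using digit_not_space x (List.mem_takeWhile_imp hx))
  rw [hq]
  exact numcond_core _ _ (fun x hx => List.mem_takeWhile_imp hx)
    (fun x r hxr => dropWhile_head t x r hxr)

-- integer codes of A's kinds
def kindCode : Option String → Int
  | none => 0
  | some k => if k = "bullet" then 1 else if k = "numbered" then 2 else 0

theorem kind_bridge (l : List Char) : lineKindB l = kindCode (sectionKind l) := by
  unfold lineKindB sectionKind
  rw [show PySem.Chars.lstrip l = l.dropWhile PySem.Chars.isspace from rfl]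
  rcases l.dropWhile PySem.Chars.isspace with _ | ⟨c, tail⟩
  · rfl
  · simp only []
    by_cases hb : (PySem.Chars.isIn [c] ['-', '*', '+'] &&
        (tail.isEmpty || PySem.Chars.isspace (tail.headD ' '))) = true
    · rw [if_pos hb, if_pos hb]; rfl
    · rw [if_neg hb, if_neg hb]
      rw [← numcond_eq (c :: tail)]
      by_cases hn : (PySem.Chars.endswith
            ((PySem.Chars.splitOnMax (c :: tail) [' '] 1).headD []) ['.'] &&
          PySem.Chars.strIsdigit
            ((PySem.Chars.splitOnMax (c :: tail) [' '] 1).headD []).dropLast) = true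
      · rw [if_pos hn, if_pos hn]; rfl
      · rw [if_neg hn, if_neg hn]; rfl

theorem sectionKind_cases (l : List Char) :
    sectionKind l = none ∨ sectionKind l = some "bullet" ∨ sectionKind l = some "numbered" := by
  unfold sectionKind
  rcases PySem.Chars.lstrip l with _ | ⟨c, tail⟩
  · exact Or.inl rfl
  · simp only []
    split_ifs <;> simp

theorem cond_bridge (a b : List Char) :
    ((lineKindB a != 0) && (lineKindB b == lineKindB a))
    = ((sectionKind a == sectionKind b) &&
        ((sectionKind a == some "bullet") || (sectionKind a == some "numbered"))) := by
  rw [kind_bridge a, kind_bridge b]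
  rcases sectionKind_cases a with ha | ha | ha <;>
    rcases sectionKind_cases b with hb | hb | hb <;>
      rw [ha, hb] <;> decide

-- ===== B's loop, reduced to the shared middle form =====

-- B's separator for one adjacent pair
def sepB (prev sec : List Char) : List Char :=
  if lineKindB (lastLineScan prev) != 0 &&
      lineKindB (firstLineScan sec) == lineKindB (lastLineScan prev)
  then ['\n'] else ['\n', '\n']

def bParts : List Char → List (List Char) → List (List Char)
  | _, [] => []
  | prev, sec :: rest => sepB prev sec :: sec :: bParts sec rest

theorem joinLoopB_run :
    ∀ (secs parts : List (List Char)) (prev : List Char), parts ≠ [] →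
      joinLoopB secs parts (lineKindB (lastLineScan prev)) =
        parts ++ bParts prev ((secs.filter
          (fun s => !s.isEmpty && !(PySem.Chars.strip s).isEmpty)).map PySem.Chars.strip) := by
  intro secs
  induction secs with
  | nil => intro parts prev _; simp [joinLoopB, bParts]
  | cons s rest ih =>
    intro parts prev hne
    by_cases h : PySem.Chars.strip s = []
    · have hf : (!s.isEmpty && !(PySem.Chars.strip s).isEmpty) = false := by
        simp [h]
      rw [List.filter_cons, hf]
      simp only [Bool.false_eq_true, if_false]
      simp only [joinLoopB, h, List.isEmpty_nil]
      exact ih parts prev hne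
    · have hs : s ≠ [] := fun hnil => h (by rw [hnil]; rfl)
      have hf : (!s.isEmpty && !(PySem.Chars.strip s).isEmpty) = true := by
        simp [h, hs]
      rw [List.filter_cons, hf]
      simp only [if_true, List.map_cons]
      simp only [joinLoopB]
      rw [if_neg (by simpa [List.isEmpty_iff] using h : ¬((PySem.Chars.strip s).isEmpty = true))]
      rw [if_neg (by simpa [List.isEmpty_iff] using hne : ¬(parts.isEmpty = true))]
      rw [show (if lineKindB (lastLineScan prev) != 0 &&
            lineKindB (firstLineScan (PySem.Chars.strip s)) == lineKindB (lastLineScan prev)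
          then ['\n'] else ['\n', '\n']) = sepB prev (PySem.Chars.strip s) from rfl]
      rw [ih (parts ++ [sepB prev (PySem.Chars.strip s)] ++ [PySem.Chars.strip s])
        (PySem.Chars.strip s) (by simp)]
      simp [bParts]

theorem joinLoopB_start :
    ∀ (secs : List (List Char)),
      joinLoopB secs [] 0 =
        match (secs.filter
            (fun s => !s.isEmpty && !(PySem.Chars.strip s).isEmpty)).map PySem.Chars.strip with
        | [] => []
        | first :: rest => first :: bParts first rest := by
  intro secs
  induction secs with
  | nil => simp [joinLoopB]
  | cons s rest ih =>
    by_cases h : PySem.Chars.strip s = []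
    · have hf : (!s.isEmpty && !(PySem.Chars.strip s).isEmpty) = false := by simp [h]
      rw [List.filter_cons, hf]
      simp only [Bool.false_eq_true, if_false]
      simp only [joinLoopB, h, List.isEmpty_nil]
      exact ih
    · have hs : s ≠ [] := fun hnil => h (by rw [hnil]; rfl)
      have hf : (!s.isEmpty && !(PySem.Chars.strip s).isEmpty) = true := by
        simp [h, hs]
      rw [List.filter_cons, hf]
      simp only [if_true, List.map_cons]
      simp only [joinLoopB]
      rw [if_neg (by simpa [List.isEmpty_iff] using h : ¬((PySem.Chars.strip s).isEmpty = true))]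
      rw [if_pos (by simp : (List.nil (α := List Char)).isEmpty = true)]
      simpa using joinLoopB_run rest [PySem.Chars.strip s] (PySem.Chars.strip s) (by simp)

-- ===== goodness of cleaned sections, and the separator bridge =====

def GoodSec (s : List Char) : Prop :=
  s ≠ [] ∧ (∀ c ∈ s, pvDomChar c = true) ∧
    (∀ c, s.getLast? = some c → PySem.Chars.isspace c = false)

theorem sepB_eq_sepOf (prev sec : List Char) (hp : GoodSec prev) (hs : GoodSec sec) :
    sepB prev sec = sepOf prev sec := by
  obtain ⟨hp1, hp2, hp3⟩ := hp
  obtain ⟨hs1, hs2, _⟩ := hs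
  unfold sepB sepOf
  rw [← lastLine_bridge prev.length prev le_rfl hp1 hp2 hp3,
      ← firstLine_bridge sec hs2, cond_bridge]

theorem bParts_join :
    ∀ (rest : List (List Char)) (prev : List Char), GoodSec prev →
      (∀ s ∈ rest, GoodSec s) →
      PySem.Chars.join [] (bParts prev rest) = bJoin prev rest := by
  intro rest
  induction rest with
  | nil => intro prev _ _; simp [bParts, bJoin, PySem.Chars.join, List.intercalate]
  | cons sec rest ih =>
    intro prev hp hr
    have hsec : GoodSec sec := hr sec (by simp)
    simp only [bParts, bJoin]
    rw [join_nil_cons, join_nil_cons, ih sec hsec (fun s hs => hr s (by simp [hs])),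
      sepB_eq_sepOf prev sec hp hsec]
    simp

-- membership in a stripped list is membership in the original
theorem mem_strip {x : Char} {s : List Char} (h : x ∈ PySem.Chars.strip s) : x ∈ s := by
  simp only [PySem.Chars.strip, PySem.Chars.rstrip, PySem.Chars.lstrip] at h
  rw [List.mem_reverse] at h
  have h1 := (List.dropWhile_sublist (l := (List.dropWhile PySem.Chars.isspace s).reverse)
    PySem.Chars.isspace).mem h
  rw [List.mem_reverse] at h1
  exact (List.dropWhile_sublist (l := s) PySem.Chars.isspace).mem h1

-- the last character of a stripped list is not whitespace
theorem strip_last (s : List Char) (c : Char)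
    (h : (PySem.Chars.strip s).getLast? = some c) : PySem.Chars.isspace c = false := by
  simp only [PySem.Chars.strip, PySem.Chars.rstrip] at h
  rw [List.getLast?_reverse] at h
  rcases hdw : List.dropWhile PySem.Chars.isspace (PySem.Chars.lstrip s).reverse with _ | ⟨a, r⟩
  · rw [hdw] at h; exact absurd h (by simp)
  · rw [hdw] at h
    simp only [List.head?_cons, Option.some.injEq] at h
    subst h
    exact dropWhile_head _ a r hdw

theorem cleaned_good (sections : List String) (hdom : Dom_join_sections_py sections) :
    ∀ s ∈ ((sections.map String.toList).filter
        (fun s => !s.isEmpty && !(PySem.Chars.strip s).isEmpty)).map PySem.Chars.strip,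
      GoodSec s := by
  intro s hs
  simp only [List.mem_map, List.mem_filter] at hs
  obtain ⟨t, ⟨htm, ht⟩, rfl⟩ := hs
  simp only [Bool.and_eq_true, Bool.not_eq_true'] at ht
  refine ⟨by simpa [List.isEmpty_iff] using ht.2, ?_, strip_last t⟩
  intro c hc
  obtain ⟨str, hstr, rfl⟩ := htm
  simp only [Dom_join_sections_py, List.all_eq_true] at hdom
  have := hdom str hstr
  simp only [pvDomStr, List.all_eq_true] at this
  exact this c (mem_strip hc)

-- ===== VERDICT (by name: the statement is the Claim_ definition above) =====
theorem join_sections_py_spec : Claim_equal_join_sections_py := by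
  intro sections hdom
  show join_sections_py sections = join_sections_py_alt sections
  have hne := cleaned_ne sections
  have hgood := cleaned_good sections hdom
  simp only [join_sections_py, join_sections_py_alt]
  rw [joinLoopB_start]
  generalize hL : ((sections.map String.toList).filter
      (fun s => !s.isEmpty && !(PySem.Chars.strip s).isEmpty)).map PySem.Chars.strip = cleaned
    at hne hgood ⊢
  cases cleaned with
  | nil => rfl
  | cons first rest =>
    have h1 : ∀ s ∈ rest, s ≠ [] := fun s hs => hne s (by simp [hs])
    simp only []
    rw [loopA_eq_bJoin rest first first rfl h1, join_nil_cons,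
      bParts_join rest first (hgood first (by simp)) (fun s hs => hgood s (by simp [hs]))]
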